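-- pv_equiv track=rewrite | github.com/MrBrantCode/unitest_baseline | mut_generate/mist_train_taco/taco_10343/solution.py | count_numbers_with_zero
-- ===== SOURCE A (Python) =====
-- def count_numbers_with_zero(N: int) -> int:
--     count = 0
--     for x in range(1, N + 1):
--         while x > 0:
--             if x % 10 == 0:
--                 count += 1
--                 break
--             x = x // 10
--     return count
-- ===== SOURCE B (Python) =====
-- def _all_digits_nonzero(n):
--     while n > 0:
--         if n % 10 == 0:
--             return False
--         n //= 10
--     return True
--
--
-- def _zero_free_count(n):
--     # count of numbers in 1..n with no digit equal to 0 (n >= 0)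
--     if n <= 9:
--         return n
--     q, r = divmod(n, 10)
--     bonus = r if _all_digits_nonzero(q) else 0
--     return 9 + 9 * _zero_free_count(q - 1) + bonus
--
--
-- def count_numbers_with_zero(N: int) -> int:
--     if N < 1:
--         return 0
--     return N - _zero_free_count(N)
-- ===== Notes on version B (the rewrite author's own statement) =====
-- stated objective: faster
-- what changed: Replaces the per-number scan of 1..N with a digit-recursion that counts zero-free numbers <= N (recursing on N//10) and returns N minus that count.
import Mathlib
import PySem

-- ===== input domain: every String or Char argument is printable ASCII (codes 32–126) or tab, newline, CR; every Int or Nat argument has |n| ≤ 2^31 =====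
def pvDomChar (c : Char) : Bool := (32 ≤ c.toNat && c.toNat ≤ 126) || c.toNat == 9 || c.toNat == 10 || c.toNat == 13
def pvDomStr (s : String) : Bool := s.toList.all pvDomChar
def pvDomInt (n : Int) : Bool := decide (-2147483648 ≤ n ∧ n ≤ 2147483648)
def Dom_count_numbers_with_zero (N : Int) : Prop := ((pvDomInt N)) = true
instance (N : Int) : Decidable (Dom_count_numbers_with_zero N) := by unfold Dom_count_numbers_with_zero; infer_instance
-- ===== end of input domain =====

-- B replaces A's per-number digit scan over 1..N by an O(log N) digit recursion
-- (N minus the count of zero-free numbers ≤ N); objective: faster (asymptotic).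

-- ===== PORT A =====
-- A's inner 'while x > 0' loop: contributes 1 iff some decimal digit of x is 0.
def pvInnerA (x : Int) : Int :=
  if h : x > 0 then
    if PySem.Int.mod x 10 = 0 then 1
    else pvInnerA (PySem.Int.floordiv x 10)
  else 0
termination_by x.toNat
decreasing_by
  rw [PySem.Int.floordiv_eq_ediv_of_pos (by norm_num)]
  omega

def count_numbers_with_zero (N : Int) : Int :=
  (PySem.List.pyRange 1 (N + 1) 1).foldl (fun count x => count + pvInnerA x) 0

-- ===== PORT B =====
-- Source B's _all_digits_nonzero
def pvAllNonzero (n : Int) : Bool :=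
  if h : n > 0 then
    if PySem.Int.mod n 10 = 0 then false
    else pvAllNonzero (PySem.Int.floordiv n 10)
  else true
termination_by n.toNat
decreasing_by
  rw [PySem.Int.floordiv_eq_ediv_of_pos (by norm_num)]
  omega

-- Source B's _zero_free_count: numbers in 1..n with no digit 0
def pvZeroFreeCount (n : Int) : Int :=
  if h : n ≤ 9 then n
  else
    let q := PySem.Int.floordiv n 10
    let r := PySem.Int.mod n 10
    let bonus := if pvAllNonzero q then r else 0
    9 + 9 * pvZeroFreeCount (q - 1) + bonus
termination_by n.toNat
decreasing_by
  rw [PySem.Int.floordiv_eq_ediv_of_pos (by norm_num)]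
  omega

def count_numbers_with_zero_alt (N : Int) : Int :=
  if N < 1 then 0 else N - pvZeroFreeCount N

-- ===== PRECONDITION & SPEC =====
def Spec_count_numbers_with_zero (N : Int) (out : Int) : Prop := out = count_numbers_with_zero_alt N
instance (N : Int) (out : Int) : Decidable (Spec_count_numbers_with_zero N out) := by unfold Spec_count_numbers_with_zero; infer_instance

-- ===== CLAIM (what is proved, stated in full; the proofs are below) =====
def Claim_equal_count_numbers_with_zero : Prop := ∀ (N : Int), Dom_count_numbers_with_zero N → Spec_count_numbers_with_zero N (count_numbers_with_zero N)

-- ===== LEMMAS AND PROOFS =====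

-- zero-free predicate on Nat (fuel form so the kernel can evaluate it)
def pvZfAux : Nat → Nat → Bool
  | 0, _ => true
  | fuel + 1, n => if n = 0 then true else (decide (n % 10 ≠ 0)) && pvZfAux fuel (n / 10)

def pvZf (n : Nat) : Bool := pvZfAux n n

lemma pvZfAux_fuel (f1 : Nat) : ∀ (f2 n : Nat), n ≤ f1 → n ≤ f2 → pvZfAux f1 n = pvZfAux f2 n := by
  induction f1 with
  | zero =>
    intro f2 n h1 _
    have : n = 0 := by omega
    subst this
    cases f2 <;> simp [pvZfAux]
  | succ f ih =>
    intro f2 n h1 h2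
    cases f2 with
    | zero =>
      have : n = 0 := by omega
      subst this; simp [pvZfAux]
    | succ f2' =>
      by_cases hn : n = 0
      · subst hn; simp [pvZfAux]
      · simp only [pvZfAux, if_neg hn]
        rw [ih f2' (n / 10) (by omega) (by omega)]

lemma pvZf_eq (n : Nat) (h : n ≠ 0) :
    pvZf n = ((decide (n % 10 ≠ 0)) && pvZf (n / 10)) := by
  obtain ⟨m, rfl⟩ : ∃ m, n = m + 1 := ⟨n - 1, by omega⟩
  show pvZfAux (m + 1) (m + 1) = _
  simp only [pvZfAux, if_neg h]
  rw [pvZfAux_fuel m ((m + 1) / 10) ((m + 1) / 10) (by omega) (by omega)]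
  rfl

-- running count of zero-free numbers in 1..n
def pvZ : Nat → Nat
  | 0 => 0
  | n + 1 => pvZ n + (if pvZf (n + 1) then 1 else 0)

lemma pvAllNonzero_nat (m : Nat) : pvAllNonzero (m : Int) = pvZf m := by
  induction m using Nat.strong_induction_on with
  | _ m ih =>
    rw [pvAllNonzero]
    by_cases hm : m = 0
    · subst hm; simp [pvZf, pvZfAux]
    · have h0 : (m : Int) > 0 := by omega
      have hmd : PySem.Int.mod (m : Int) 10 = ((m % 10 : Nat) : Int) := by
        exact_mod_cast PySem.Int.mod_natCast m 10
      have hfd : PySem.Int.floordiv (m : Int) 10 = ((m / 10 : Nat) : Int) := by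
        exact_mod_cast PySem.Int.floordiv_natCast m 10
      rw [dif_pos h0, hmd, hfd, pvZf_eq m hm, ih (m / 10) (by omega)]
      by_cases hmod : m % 10 = 0
      · simp [hmod]
      · have hdvd : ¬((10 : Int) ∣ (m : Int)) := by omega
        simp [hmod, hdvd]

lemma pvInnerA_nat (m : Nat) : pvInnerA (m : Int) = if pvZf m then 0 else 1 := by
  induction m using Nat.strong_induction_on with
  | _ m ih =>
    rw [pvInnerA]
    by_cases hm : m = 0
    · subst hm; simp [pvZf, pvZfAux]
    · have h0 : (m : Int) > 0 := by omega
      have hmd : PySem.Int.mod (m : Int) 10 = ((m % 10 : Nat) : Int) := by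
        exact_mod_cast PySem.Int.mod_natCast m 10
      have hfd : PySem.Int.floordiv (m : Int) 10 = ((m / 10 : Nat) : Int) := by
        exact_mod_cast PySem.Int.floordiv_natCast m 10
      rw [dif_pos h0, hmd, hfd, pvZf_eq m hm, ih (m / 10) (by omega)]
      by_cases hmod : m % 10 = 0
      · simp [hmod]
      · have hdvd : ¬((10 : Int) ∣ (m : Int)) := by omega
        simp [hmod, hdvd]

lemma pvA_eq_nat (n : Nat) : count_numbers_with_zero (n : Int) = (n : Int) - (pvZ n : Int) := by
  induction n with
  | zero =>
    simp [count_numbers_with_zero, PySem.List.pyRange_one_eq_nil (by norm_num : (0:Int) + 1 ≤ 1), pvZ]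
  | succ n ih =>
    unfold count_numbers_with_zero
    have hsplit : PySem.List.pyRange 1 ((n : Int) + 1 + 1) 1
        = PySem.List.pyRange 1 ((n : Int) + 1) 1 ++ [(n : Int) + 1] := by
      exact PySem.List.pyRange_one_succ_right (by omega)
    push_cast
    rw [hsplit, List.foldl_append]
    unfold count_numbers_with_zero at ih
    rw [ih]
    have hc : ((n : Int) + 1) = ((n + 1 : Nat) : Int) := by push_cast; ring
    simp only [List.foldl_cons, List.foldl_nil, hc, pvInnerA_nat (n + 1), pvZ]
    split <;> push_cast <;> ring

lemma pvZ_base (n : Nat) (h : n ≤ 9) : pvZ n = n := by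
  interval_cases n <;> decide

lemma pvZ_rec (n : Nat) (h : 10 ≤ n) :
    pvZ n = 9 + 9 * pvZ (n / 10 - 1) + (if pvZf (n / 10) then n % 10 else 0) := by
  induction n, h using Nat.le_induction with
  | base => decide
  | succ n hn ih =>
    have hq : 1 ≤ n / 10 := by omega
    have hZq : pvZ (n / 10) = pvZ (n / 10 - 1) + (if pvZf (n / 10) then 1 else 0) := by
      have : n / 10 = (n / 10 - 1) + 1 := by omega
      rw [this, pvZ]; rw [← this]
    by_cases hmod : n % 10 = 9
    · have h1 : (n + 1) / 10 = n / 10 + 1 := by omega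
      have h2 : (n + 1) % 10 = 0 := by omega
      have hzf : pvZf (n + 1) = false := by
        rw [pvZf_eq (n + 1) (by omega), h2]; simp
      rw [pvZ, hzf, if_neg (by simp), h1, h2]
      simp only [Nat.add_sub_cancel, if_neg]
      rw [ih, hZq, hmod]
      by_cases hz : pvZf (n / 10) <;> simp [hz] <;> ring
    · have h1 : (n + 1) / 10 = n / 10 := by omega
      have h2 : (n + 1) % 10 = n % 10 + 1 := by omega
      have hzf : pvZf (n + 1) = pvZf (n / 10) := by
        rw [pvZf_eq (n + 1) (by omega), h1, h2]; simp
      rw [pvZ, hzf, h1, h2, ih]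
      by_cases hz : pvZf (n / 10) <;> simp [hz] <;> ring

lemma pvB_eq_nat (m : Nat) : pvZeroFreeCount (m : Int) = (pvZ m : Int) := by
  induction m using Nat.strong_induction_on with
  | _ m ih =>
    rw [pvZeroFreeCount]
    by_cases h9 : m ≤ 9
    · rw [dif_pos (by omega), pvZ_base m h9]
    · have h10 : 10 ≤ m := by omega
      rw [dif_neg (by omega)]
      have hmd : PySem.Int.mod (m : Int) 10 = ((m % 10 : Nat) : Int) := by
        exact_mod_cast PySem.Int.mod_natCast m 10
      have hfd : PySem.Int.floordiv (m : Int) 10 = ((m / 10 : Nat) : Int) := by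
        exact_mod_cast PySem.Int.floordiv_natCast m 10
      simp only [hmd, hfd, pvAllNonzero_nat (m / 10)]
      have hc : ((m / 10 : Nat) : Int) - 1 = ((m / 10 - 1 : Nat) : Int) := by
        have : 1 ≤ m / 10 := by omega
        omega
      rw [hc, ih (m / 10 - 1) (by omega), pvZ_rec m h10]
      by_cases hz : pvZf (m / 10) <;> simp [hz] <;> push_cast <;> ring

-- ===== VERDICT (by name: the statement is the Claim_ definition above) =====
theorem count_numbers_with_zero_spec : Claim_equal_count_numbers_with_zero := by
  intro N _
  unfold Spec_count_numbers_with_zero count_numbers_with_zero_alt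
  by_cases hN : N < 1
  · rw [if_pos hN]
    unfold count_numbers_with_zero
    rw [PySem.List.pyRange_one_eq_nil (by omega)]
    rfl
  · rw [if_neg hN]
    have hNn : N = ((N.toNat : Nat) : Int) := by omega
    rw [hNn, pvA_eq_nat, pvB_eq_nat]
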